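-- pv_equiv track=rewrite | github.com/yanlizhou/CompositionalDiversity | bayes_utility/render_util.py | if_legal_combo
-- ===== SOURCE A (Python) =====
-- from itertools import combinations
--
-- def if_legal_combo(attached):
--     all_pairs = list(combinations(attached,2))
--     for pair in all_pairs:
--         if pair[0][1]==pair[1][1] and pair[0][2]==pair[1][2]:
--             if pair[0][0] == 0:
--                 if pair[1][0] != 2:
--                     return False
--             elif pair[0][0] == 1:
--                 if pair[1][0] != 3:
--                     return False
--             elif pair[0][0] == 2:
--                 if pair[1][0] != 0:
--                     return False
--             elif pair[0][0] == 3: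
--                 if pair[1][0] != 1:
--                     return False
--     return True
-- ===== SOURCE B (Python) =====
-- def if_legal_combo(attached):
--     # One linear pass: group the item codes by their (x[1], x[2]) key, then scan
--     # each group once, maintaining the set of codes that every later member of the
--     # group is required to equal (the partner of each in-range code seen so far).
--     PARTNER = {0: 2, 1: 3, 2: 0, 3: 1}
--     pairs = [((item[1], item[2]), item[0]) for item in attached]
--     groups = {}
--     for key, c in pairs:
--         groups.setdefault(key, []).append(c)
--     for codes in groups.values():
--         required = set()
--         for c in codes:
--             if required and (len(required) > 1 or c not in required):
--                 return False
--             if c in PARTNER: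
--                 required.add(PARTNER[c])
--     return True
-- ===== Notes on version B (the rewrite author's own statement) =====
-- stated objective: faster
-- what changed: Replaces the O(n^2) scan over all itertools.combinations pairs by a single pass that groups item codes by their (x[1],x[2]) key in a dict and then checks each group linearly, carrying the set of partner codes every later group member must equal.
-- outside the precondition, e.g. on if_legal_combo([[0]]): A returns True, B raises IndexError
import Mathlib
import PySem

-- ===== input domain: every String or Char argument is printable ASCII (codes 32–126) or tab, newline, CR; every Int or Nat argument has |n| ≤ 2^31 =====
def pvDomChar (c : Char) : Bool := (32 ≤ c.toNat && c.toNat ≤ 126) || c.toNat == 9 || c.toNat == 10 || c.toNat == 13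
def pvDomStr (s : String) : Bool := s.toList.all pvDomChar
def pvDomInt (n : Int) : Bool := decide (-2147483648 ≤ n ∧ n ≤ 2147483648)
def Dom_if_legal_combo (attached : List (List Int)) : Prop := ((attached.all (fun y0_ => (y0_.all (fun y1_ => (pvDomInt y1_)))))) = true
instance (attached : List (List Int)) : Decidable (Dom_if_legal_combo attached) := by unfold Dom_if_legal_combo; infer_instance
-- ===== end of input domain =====

-- B replaces A's scan over all O(n^2) combinations pairs by grouping the item codes by their
-- (x[1], x[2]) key in a dict and checking each group in one linear pass (objective: faster).

-- ===== PORT A =====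
-- item[i] for i = 0,1,2: in range under Pre_ (out of range Python raises IndexError, excluded there)
def pvGetI (x : List Int) (i : Int) : Int := PySem.List.pyGetD x i 0
-- pair[i]: indexing a combinations element (always in range: combos have length 2)
def pvGetL (p : List (List Int)) (i : Int) : List Int := (PySem.List.pyGet? p i).getD []

-- the 'for pair in all_pairs' loop with its early returns
def pvLoopA : List (List (List Int)) → Bool
  | [] => true
  | pair :: rest =>
    if pvGetI (pvGetL pair 0) 1 == pvGetI (pvGetL pair 1) 1 &&
       pvGetI (pvGetL pair 0) 2 == pvGetI (pvGetL pair 1) 2 then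
      if pvGetI (pvGetL pair 0) 0 == 0 then
        if pvGetI (pvGetL pair 1) 0 != 2 then false else pvLoopA rest
      else if pvGetI (pvGetL pair 0) 0 == 1 then
        if pvGetI (pvGetL pair 1) 0 != 3 then false else pvLoopA rest
      else if pvGetI (pvGetL pair 0) 0 == 2 then
        if pvGetI (pvGetL pair 1) 0 != 0 then false else pvLoopA rest
      else if pvGetI (pvGetL pair 0) 0 == 3 then
        if pvGetI (pvGetL pair 1) 0 != 1 then false else pvLoopA rest
      else pvLoopA rest
    else pvLoopA rest

def if_legal_combo (attached : List (List Int)) : Bool :=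
  pvLoopA (PySem.List.combinations attached 2)

-- ===== PORT B =====
def pvPARTNER : PySem.Dict Int Int := PySem.Dict.ofList [(0, 2), (1, 3), (2, 0), (3, 1)]

-- the inner 'for c in codes' loop carrying the `required` set
def pvLoopG : List Int → PySem.Set Int → Bool
  | [], _ => true
  | c :: cs, required =>
    if required.length != 0 && (required.length > 1 || !(PySem.Set.contains required c)) then
      false
    else
      pvLoopG cs
        (if pvPARTNER.contains c then PySem.Set.add required ((pvPARTNER.get? c).getD 0)
         else required)

-- the outer 'for codes in groups.values()' loop
def pvLoopB : List (List Int) → Bool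
  | [] => true
  | codes :: rest => if pvLoopG codes PySem.Set.empty then pvLoopB rest else false

-- groups.setdefault(key, []).append(c) observably equals groups[key] = groups.get(key, []) + [c]
-- here (the group list has no other reference), ported as Dict.modify with (· ++ [c]).
def if_legal_combo_alt (attached : List (List Int)) : Bool :=
  let pairs := attached.map (fun item => ((pvGetI item 1, pvGetI item 2), pvGetI item 0))
  let groups := pairs.foldl (fun d p => d.modify p.1 [] (· ++ [p.2])) PySem.Dict.empty
  pvLoopB groups.values

-- ===== PRECONDITION & SPEC =====
-- Pre_ excludes lists containing an item of length < 3: indexing such an item raises IndexError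
-- in Python (A returns there only when too few items or an earlier False hides the short item;
-- B raises on any such input). It is needed for faithfulness to the Pythons, not by the proof:
-- the totalized ports agree on all inputs.
def Pre_if_legal_combo (attached : List (List Int)) : Prop := ∀ x ∈ attached, 3 ≤ x.length
instance (attached : List (List Int)) : Decidable (Pre_if_legal_combo attached) := by
  unfold Pre_if_legal_combo; infer_instance

def pvWitness_if_legal_combo : List (List Int) := [[0, 1, 2], [2, 1, 2], [1, 5, 5], [3, 5, 5]]

def Spec_if_legal_combo (attached : List (List Int)) (out : Bool) : Prop := out = if_legal_combo_alt attached
instance (attached : List (List Int)) (out : Bool) : Decidable (Spec_if_legal_combo attached out) := by unfold Spec_if_legal_combo; infer_instance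

-- ===== CLAIM (what is proved, stated in full; the proofs are below) =====
def Claim_equal_if_legal_combo : Prop := ∀ (attached : List (List Int)), Dom_if_legal_combo attached → Pre_if_legal_combo attached → Spec_if_legal_combo attached (if_legal_combo attached)

-- ===== LEMMAS AND PROOFS =====

-- the legality relation both programs decide, pairwise along the list:
-- items with equal (x[1], x[2]) key must carry partnered codes (0↔2, 1↔3)
def pvPOkC (c d : Int) : Prop :=
  (c = 0 → d = 2) ∧ (c = 1 → d = 3) ∧ (c = 2 → d = 0) ∧ (c = 3 → d = 1)
def pvKey (x : List Int) : Int × Int := (pvGetI x 1, pvGetI x 2)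
def pvPOk (a b : List Int) : Prop := pvKey a = pvKey b → pvPOkC (pvGetI a 0) (pvGetI b 0)

-- ---- A's loop decides pvPOk pairwise ----

-- Bool form of pvPOk (for rewriting A's loop; no Decidable instance is declared)
def pvPOkB (a b : List Int) : Bool :=
  !(pvGetI a 1 == pvGetI b 1 && pvGetI a 2 == pvGetI b 2) ||
    ((!(pvGetI a 0 == 0) || pvGetI b 0 == 2) && (!(pvGetI a 0 == 1) || pvGetI b 0 == 3) &&
     (!(pvGetI a 0 == 2) || pvGetI b 0 == 0) && (!(pvGetI a 0 == 3) || pvGetI b 0 == 1))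

theorem pvPOkB_iff (a b : List Int) : pvPOkB a b = true ↔ pvPOk a b := by
  simp [pvPOkB, pvPOk, pvPOkC, pvKey, Prod.ext_iff]
  tauto

theorem pvLoopA_cons_eq (pair : List (List Int)) (rest : List (List (List Int))) :
    pvLoopA (pair :: rest) = (pvPOkB (pvGetL pair 0) (pvGetL pair 1) && pvLoopA rest) := by
  simp only [pvLoopA, pvPOkB]
  split_ifs with h1 h2 h3 h4 h5 <;> simp_all
  tauto

theorem pvLoopA_all (ps : List (List (List Int))) :
    pvLoopA ps = ps.all (fun p => pvPOkB (pvGetL p 0) (pvGetL p 1)) := by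
  induction ps with
  | nil => rfl
  | cons p rest ih => rw [pvLoopA_cons_eq, ih, List.all_cons]

theorem A_iff (l : List (List Int)) : if_legal_combo l = true ↔ List.Pairwise pvPOk l := by
  rw [if_legal_combo, pvLoopA_all]
  induction l with
  | nil => simp [PySem.List.combinations]
  | cons x xs ih =>
    rw [PySem.List.combinations_cons_succ, PySem.List.combinations_one]
    simp only [List.all_append, List.map_map, List.all_map, List.pairwise_cons, Bool.and_eq_true,
      List.all_eq_true, Function.comp] at *
    rw [← ih]
    simp [pvGetL, PySem.List.pyGet?, PySem.List.pyIdx?, pvPOkB_iff]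

-- ---- B's inner loop decides pvPOkC pairwise within one group ----

theorem pvContains_char (c : Int) : pvPARTNER.contains c = (0 == c || 1 == c || 2 == c || 3 == c) := by
  simp [pvPARTNER, PySem.Dict.ofList, PySem.Dict.update, PySem.Dict.insert, PySem.Dict.empty,
    PySem.Dict.contains, Bool.or_assoc]

theorem pvPOkC_iff (c d : Int) :
    pvPOkC c d ↔ (pvPARTNER.contains c = true → d = (pvPARTNER.get? c).getD 0) := by
  rw [pvContains_char]
  by_cases h0 : c = 0
  · subst h0; simp [pvPOkC, pvPARTNER]; rfl
  · by_cases h1 : c = 1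
    · subst h1; simp [pvPOkC, pvPARTNER, h0]; rfl
    · by_cases h2 : c = 2
      · subst h2; simp [pvPOkC, pvPARTNER]; rfl
      · by_cases h3 : c = 3
        · subst h3; simp [pvPOkC, pvPARTNER]; rfl
        · simp [pvPOkC, h0, h1, h2, h3, Ne.symm h0, Ne.symm h1, Ne.symm h2, Ne.symm h3]

-- the loop's pass condition on a duplicate-free `required`: every required code equals c
theorem pvGuard_char (req : PySem.Set Int) (c : Int) (h : req.Nodup) :
    (req.length != 0 && (req.length > 1 || !(PySem.Set.contains req c))) = false ↔
      ∀ r ∈ req, r = c := by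
  rcases req with _ | ⟨r1, _ | ⟨r2, rs⟩⟩
  · simp
  · simp [PySem.Set.contains]; omega
  · have hno : ¬ ∀ r ∈ r1 :: r2 :: rs, r = c := by
      intro hh
      have e1 : r1 = c := hh r1 (by simp)
      have e2 : r2 = c := hh r2 (by simp)
      rw [e1, e2] at h
      simp at h
    simp only [List.length_cons, hno, iff_false]
    simp

theorem pvLoopG_iff (cs : List Int) : ∀ (req : PySem.Set Int), req.Nodup →
    (pvLoopG cs req = true ↔ List.Pairwise pvPOkC cs ∧ ∀ r ∈ req, ∀ c ∈ cs, r = c) := by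
  induction cs with
  | nil => intro req h; simp [pvLoopG]
  | cons c cs ih =>
    intro req hnd
    rw [pvLoopG]
    by_cases hg : (req.length != 0 && (req.length > 1 || !(PySem.Set.contains req c))) = false
    · rw [hg]
      simp only [Bool.false_eq_true, if_false]
      have hpass : ∀ r ∈ req, r = c := (pvGuard_char req c hnd).mp hg
      by_cases hc : pvPARTNER.contains c = true
      · rw [if_pos hc, ih _ (PySem.Set.nodup_add req _ hnd)]
        simp only [List.pairwise_cons]
        constructor
        · rintro ⟨hpw, hall⟩
          refine ⟨⟨fun d hd => ?_, hpw⟩, fun r hr d hd => ?_⟩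
          · rw [pvPOkC_iff]
            intro _
            exact ((hall _ ((PySem.Set.mem_add req _ _).mpr (Or.inr rfl)) d hd)).symm
          · rcases List.mem_cons.mp hd with hd | hd
            · exact hd ▸ hpass r hr
            · exact hall r ((PySem.Set.mem_add req _ _).mpr (Or.inl hr)) d hd
        · rintro ⟨⟨hhd, hpw⟩, hall⟩
          refine ⟨hpw, fun r hr d hd => ?_⟩
          rcases (PySem.Set.mem_add req _ _).mp hr with hr | hr
          · exact hall r hr d (List.mem_cons.mpr (Or.inr hd))
          · subst hr
            exact ((pvPOkC_iff c d).mp (hhd d hd) hc).symm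
      · rw [if_neg hc, ih _ hnd]
        simp only [List.pairwise_cons]
        constructor
        · rintro ⟨hpw, hall⟩
          refine ⟨⟨fun d hd => ?_, hpw⟩, fun r hr d hd => ?_⟩
          · rw [pvPOkC_iff]
            intro hcc
            exact absurd hcc hc
          · rcases List.mem_cons.mp hd with hd | hd
            · exact hd ▸ hpass r hr
            · exact hall r hr d hd
        · rintro ⟨⟨hhd, hpw⟩, hall⟩
          exact ⟨hpw, fun r hr d hd => hall r hr d (List.mem_cons.mpr (Or.inr hd))⟩
    · rw [Bool.not_eq_false] at hg
      rw [hg]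
      simp only [if_true, Bool.false_eq_true, false_iff]
      rintro ⟨hpw, hall⟩
      have : ¬ ∀ r ∈ req, r = c := by
        intro hh
        rw [(pvGuard_char req c hnd).mpr hh] at hg
        simp at hg
      exact this (fun r hr => hall r hr c List.mem_cons_self)

-- ---- B as a whole: every key's group is pvPOkC-pairwise ----

theorem pvLoopB_all (vals : List (List Int)) :
    pvLoopB vals = vals.all (fun codes => pvLoopG codes PySem.Set.empty) := by
  induction vals with
  | nil => rfl
  | cons v rest ih =>
    rw [pvLoopB, ih, List.all_cons]
    by_cases h : pvLoopG v PySem.Set.empty = true <;> simp_all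

theorem pvGroup_eq (l : List (List Int)) (k : Int × Int) :
    ((l.map (fun item => ((pvGetI item 1, pvGetI item 2), pvGetI item 0))).filter
        (fun p => p.1 == k)).map (fun p => p.2) =
      (l.filter (fun x => pvKey x == k)).map (fun x => pvGetI x 0) := by
  rw [List.filter_map, List.map_map]
  rfl

theorem B_iff (l : List (List Int)) :
    if_legal_combo_alt l = true ↔
      ∀ k : Int × Int,
        List.Pairwise pvPOkC ((l.filter (fun x => pvKey x == k)).map (fun x => pvGetI x 0)) := by
  rw [if_legal_combo_alt]
  have hnd : ((l.map (fun item => ((pvGetI item 1, pvGetI item 2), pvGetI item 0))).foldl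
      (fun d p => d.modify p.1 [] (· ++ [p.2])) PySem.Dict.empty).keys.Nodup :=
    PySem.Dict.nodup_keys_foldl_modify_key _ _ _ _ _ PySem.Dict.nodup_keys_empty
  rw [pvLoopB_all, PySem.Dict.values_eq_map_keys _ hnd [], PySem.Dict.keys_foldl_modify_key]
  simp only [List.all_map, List.all_eq_true, Function.comp]
  constructor
  · intro hall k
    by_cases hk : k ∈ (l.map (fun item => ((pvGetI item 1, pvGetI item 2), pvGetI item 0))).map Prod.fst
    · have h1 := hall k (by
        rw [PySem.Dict.keys_empty]
        exact (PySem.Set.mem_ofList _ _).mpr hk)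
      rw [PySem.Dict.getD_foldl_modify_append, PySem.Dict.getD_empty, List.nil_append,
        pvGroup_eq, pvLoopG_iff _ PySem.Set.empty (by simp [PySem.Set.empty])] at h1
      exact h1.1
    · have hfil : l.filter (fun x => pvKey x == k) = [] := by
        apply List.filter_eq_nil_iff.mpr
        intro x hx hkx
        exact hk (List.mem_map.mpr ⟨_, List.mem_map.mpr ⟨x, hx, rfl⟩, by
          rw [beq_iff_eq] at hkx; exact hkx⟩)
      rw [hfil]
      simp
  · intro hall k hkmem
    rw [PySem.Dict.getD_foldl_modify_append, PySem.Dict.getD_empty, List.nil_append,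
      pvGroup_eq, pvLoopG_iff _ PySem.Set.empty (by simp [PySem.Set.empty])]
    exact ⟨hall k, by simp⟩

-- ---- the pairwise condition splits by key ----

theorem pvPairwise_filter (l : List (List Int)) :
    List.Pairwise pvPOk l ↔
      ∀ k : Int × Int,
        List.Pairwise pvPOkC ((l.filter (fun x => pvKey x == k)).map (fun x => pvGetI x 0)) := by
  induction l with
  | nil => simp
  | cons x xs ih =>
    simp only [List.pairwise_cons, List.filter_cons]
    constructor
    · rintro ⟨hhd, hpw⟩ k
      by_cases hk : (pvKey x == k) = true
      · rw [if_pos hk, List.map_cons, List.pairwise_cons]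
        refine ⟨?_, (ih.mp hpw) k⟩
        intro d hd
        rcases List.mem_map.mp hd with ⟨b, hb, rfl⟩
        have hbf := List.mem_filter.mp hb
        rw [beq_iff_eq] at hk
        rw [beq_iff_eq] at *
        exact hhd b hbf.1 (by rw [hk, hbf.2])
      · rw [if_neg (by simpa using hk)]
        exact (ih.mp hpw) k
    · intro hall
      refine ⟨?_, ih.mpr (fun k => ?_)⟩
      · intro b hb hkey
        have h1 := hall (pvKey x)
        rw [if_pos (by simp)] at h1
        rw [List.map_cons, List.pairwise_cons] at h1
        exact h1.1 (pvGetI b 0)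
          (List.mem_map.mpr ⟨b, List.mem_filter.mpr ⟨hb, by rw [beq_iff_eq, ← hkey]⟩, rfl⟩)
      · have h1 := hall k
        by_cases hk : (pvKey x == k) = true
        · rw [if_pos hk, List.map_cons, List.pairwise_cons] at h1
          exact h1.2
        · rwa [if_neg (by simpa using hk)] at h1

-- ===== VERDICT (by name: the statement is the Claim_ definition above) =====
theorem if_legal_combo_spec : Claim_equal_if_legal_combo := by
  intro attached _ _
  unfold Spec_if_legal_combo
  have h : (if_legal_combo attached = true) ↔ (if_legal_combo_alt attached = true) := by
    rw [A_iff, B_iff, pvPairwise_filter]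
  cases ha : if_legal_combo attached <;> cases hb : if_legal_combo_alt attached <;>
    simp_all
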